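-- pv_equiv track=rewrite | github.com/shitlsh/boardrule-rag | services/rule_engine/ingestion/index_builder.py | _summarize_text_batch_for_embed_log
-- ===== SOURCE A (Python) =====
-- def _summarize_text_batch_for_embed_log(texts: list[str]) -> dict[str, int | float]:
--     """Lightweight stats for diagnosing provider batch mismatches (no full text in logs)."""
--     n = len(texts)
--     if n == 0:
--         return {"count": 0, "empty_strings": 0, "min_chars": 0, "max_chars": 0, "total_chars": 0}
--     lens = [len(t) for t in texts]
--     empty = sum(1 for t in texts if t == "")
--     return {
--         "count": n,
--         "empty_strings": empty,
--         "min_chars": min(lens),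
--         "max_chars": max(lens),
--         "total_chars": sum(lens),
--     }
-- ===== SOURCE B (Python) =====
-- def _summarize_text_batch_for_embed_log(texts: list[str]) -> dict[str, int | float]:
--     """Single-pass accumulator version: one loop maintains total/empty/min/max."""
--     if not texts:
--         return {"count": 0, "empty_strings": 0, "min_chars": 0, "max_chars": 0, "total_chars": 0}
--     total = 0
--     empty = 0
--     mn = None
--     mx = None
--     for t in texts:
--         L = len(t)
--         total += L
--         if t == "":
--             empty += 1
--         mn = L if mn is None else min(mn, L)
--         mx = L if mx is None else max(mx, L)
--     return {
--         "count": len(texts),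
--         "empty_strings": empty,
--         "min_chars": mn,
--         "max_chars": mx,
--         "total_chars": total,
--     }
-- ===== Notes on version B (the rewrite author's own statement) =====
-- stated objective: alternative
-- what changed: Replaces A's precomputed lens list plus separate sum/min/max/generator-count passes by a single loop over texts maintaining total/empty/min/max accumulators (min/max seeded from None).
import Mathlib
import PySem

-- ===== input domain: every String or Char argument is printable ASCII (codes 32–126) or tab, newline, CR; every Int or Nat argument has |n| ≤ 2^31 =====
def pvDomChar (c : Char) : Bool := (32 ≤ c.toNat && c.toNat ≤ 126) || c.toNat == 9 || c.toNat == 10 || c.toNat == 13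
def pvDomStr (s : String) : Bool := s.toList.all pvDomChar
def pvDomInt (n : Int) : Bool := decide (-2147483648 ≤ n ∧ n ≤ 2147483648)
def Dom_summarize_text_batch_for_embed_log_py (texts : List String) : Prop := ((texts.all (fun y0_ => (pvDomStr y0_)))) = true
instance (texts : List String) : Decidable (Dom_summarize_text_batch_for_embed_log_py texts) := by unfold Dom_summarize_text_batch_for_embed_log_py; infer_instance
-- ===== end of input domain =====

-- B replaces A's lens list and separate sum/min/max/count passes by one accumulator loop (alternative decomposition, same cost).


-- ===== PORT A =====
def summarize_text_batch_for_embed_log_py (texts : List String) : List (String × Int) :=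
  let n : Int := texts.length
  if n == 0 then
    [("count", 0), ("empty_strings", 0), ("min_chars", 0), ("max_chars", 0), ("total_chars", 0)]
  else
    let lens : List Int := texts.map (fun t => PySem.Str.len t)
    let empty : Int := texts.foldl (fun acc t => if t == "" then acc + 1 else acc) 0
    [("count", n),
     ("empty_strings", empty),
     ("min_chars", (PySem.List.min? lens (fun x => x)).getD 0),
     ("max_chars", (PySem.List.max? lens (fun x => x)).getD 0),
     ("total_chars", lens.sum)]

-- ===== PORT B =====
-- one fold over texts with state (total, empty, mn?, mx?)
def summarize_text_batch_for_embed_log_py_alt (texts : List String) : List (String × Int) :=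
  match texts with
  | [] =>
    [("count", 0), ("empty_strings", 0), ("min_chars", 0), ("max_chars", 0), ("total_chars", 0)]
  | _ =>
    let st := texts.foldl
      (fun (st : Int × Int × Option Int × Option Int) t =>
        let L : Int := PySem.Str.len t
        (st.1 + L,
         (if t == "" then st.2.1 + 1 else st.2.1),
         (match st.2.2.1 with | none => some L | some m => some (min m L)),
         (match st.2.2.2 with | none => some L | some m => some (max m L))))
      (0, 0, none, none)
    [("count", (texts.length : Int)),
     ("empty_strings", st.2.1),
     ("min_chars", st.2.2.1.getD 0),
     ("max_chars", st.2.2.2.getD 0),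
     ("total_chars", st.1)]

-- ===== PRECONDITION & SPEC =====
def Spec_summarize_text_batch_for_embed_log_py (texts : List String) (out : List (String × Int)) : Prop := out = summarize_text_batch_for_embed_log_py_alt texts
instance (texts : List String) (out : List (String × Int)) : Decidable (Spec_summarize_text_batch_for_embed_log_py texts out) := by unfold Spec_summarize_text_batch_for_embed_log_py; infer_instance

-- ===== CLAIM (what is proved, stated in full; the proofs are below) =====
def Claim_equal_summarize_text_batch_for_embed_log_py : Prop := ∀ (texts : List String), Dom_summarize_text_batch_for_embed_log_py texts → Spec_summarize_text_batch_for_embed_log_py texts (summarize_text_batch_for_embed_log_py texts)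

-- ===== LEMMAS AND PROOFS =====

-- invariant of B's fold once min/max are seeded
theorem pv_fold_inv (ts : List String) (total empty mn mx : Int) :
    ts.foldl
      (fun (st : Int × Int × Option Int × Option Int) t =>
        let L : Int := PySem.Str.len t
        (st.1 + L,
         (if t == "" then st.2.1 + 1 else st.2.1),
         (match st.2.2.1 with | none => some L | some m => some (min m L)),
         (match st.2.2.2 with | none => some L | some m => some (max m L))))
      (total, empty, some mn, some mx)
    = (total + (ts.map (fun t => PySem.Str.len t)).sum,
       empty + (ts.count "" : Int),
       some ((ts.map (fun t => PySem.Str.len t)).foldl min mn),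
       some ((ts.map (fun t => PySem.Str.len t)).foldl max mx)) := by
  induction ts generalizing total empty mn mx with
  | nil => simp
  | cons h t ih =>
    simp only [List.foldl_cons, List.map_cons, List.sum_cons, List.count_cons]
    rw [ih]
    by_cases hE : h = "" <;> simp [hE] <;> and_intros <;> push_cast <;> ring

theorem summarize_text_batch_for_embed_log_py_spec' (texts : List String) :
    summarize_text_batch_for_embed_log_py texts = summarize_text_batch_for_embed_log_py_alt texts := by
  cases texts with
  | nil => rfl
  | cons h t =>
    unfold summarize_text_batch_for_embed_log_py summarize_text_batch_for_embed_log_py_alt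
    simp only [List.foldl_cons, List.map_cons]
    rw [pv_fold_inv, PySem.List.min?_id_cons, PySem.List.max?_id_cons,
        PySem.List.foldl_beq_add_one]
    simp
    intro hc
    exfalso
    omega

-- ===== VERDICT (by name: the statement is the Claim_ definition above) =====
theorem summarize_text_batch_for_embed_log_py_spec : Claim_equal_summarize_text_batch_for_embed_log_py := by
  intro texts _
  exact summarize_text_batch_for_embed_log_py_spec' texts
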